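-- pv_equiv track=rewrite | github.com/changjinhan/my-algo-journey | SW-Expert-Academy/4322. [연습문제] 패킷 처리/solution.py | simulation_bfs
-- ===== SOURCE A (Python) =====
-- from collections import deque
--
-- def simulation_bfs(packets, num_cpus):
--     q = deque()
--     q.append((0, 0, [0] * num_cpus)) # (pidx, prev_time, wait_times)
--     visited = set()
--
--     while q:
--         pidx, prev, wtimes = q.popleft()
--         if pidx == len(packets): # 모든 패킷이 처리된 경우
--             return True
--
--         cur, ptime = packets[pidx]
--         time_delta = cur - prev
--         wtimes = [max(w - time_delta, 0) for w in wtimes] # CPU 별 남은 처리 시간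
--         wtimes.sort() # 남은 처리 시간 순서가 달라도 같은 경우이므로
--
--         state = (pidx, tuple(wtimes))
--         if state in visited:
--             continue
--         visited.add(state) # 방문한 상태 업데이트
--
--         for i in range(num_cpus):
--             if wtimes[i] + ptime > 10:
--                 continue
--             new_wtimes = wtimes.copy()
--             new_wtimes[i] += ptime
--             q.append((pidx+1, cur, new_wtimes))
--
--     return False
-- ===== SOURCE B (Python) =====
-- def simulation_bfs(packets, num_cpus):
--     # Layered set-DP: the FIFO queue of the BFS is processed level by level,
--     # so it suffices to carry the set of reachable wait-time tuples per packet index.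
--     frontier = {tuple([0] * num_cpus)}
--     prev = 0
--     for cur, ptime in packets:
--         delta = cur - prev
--         nxt = set()
--         for wt in frontier:
--             norm = sorted(max(w - delta, 0) for w in wt)
--             for i in range(num_cpus):
--                 if norm[i] + ptime > 10:
--                     continue
--                 new_wt = norm.copy()
--                 new_wt[i] += ptime
--                 nxt.add(tuple(new_wt))
--         if not nxt:
--             return False
--         frontier = nxt
--         prev = cur
--     return True
-- ===== Notes on version B (the rewrite author's own statement) =====
-- stated objective: alternative
-- what changed: Replaces the explicit deque-BFS with a per-level set dynamic programming: the queue and the (pidx, tuple) visited set disappear, replaced by a fold over the packets carrying only the set of reachable wait-time tuples of the current level.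
import Mathlib
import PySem

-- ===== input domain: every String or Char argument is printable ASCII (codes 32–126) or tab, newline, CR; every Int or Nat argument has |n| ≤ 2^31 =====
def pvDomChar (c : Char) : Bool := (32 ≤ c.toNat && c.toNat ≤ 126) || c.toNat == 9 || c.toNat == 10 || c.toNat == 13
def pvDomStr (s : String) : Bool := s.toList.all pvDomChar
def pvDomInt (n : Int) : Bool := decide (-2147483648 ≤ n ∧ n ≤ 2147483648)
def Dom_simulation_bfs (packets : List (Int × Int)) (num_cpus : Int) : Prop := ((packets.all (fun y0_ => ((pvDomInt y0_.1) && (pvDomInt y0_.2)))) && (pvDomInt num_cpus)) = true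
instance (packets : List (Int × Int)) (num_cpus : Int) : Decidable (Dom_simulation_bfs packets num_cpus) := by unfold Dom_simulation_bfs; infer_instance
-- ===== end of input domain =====

-- B replaces A's explicit deque-BFS + visited set by a per-level set DP (fold over the
-- packets carrying the set of reachable wait-time tuples); same return value everywhere.

-- ===== PORT A =====
-- shared by both ports (the same two Python lines occur in both sources):
-- wtimes = [max(w - time_delta, 0) for w in wtimes]; wtimes.sort()
def pvNorm (delta : Int) (wt : List Int) : List Int :=
  PySem.List.sorted (wt.map (fun w => max (w - delta) 0)) (fun x => x) false

-- new_wtimes = wtimes.copy(); new_wtimes[i] += ptime  (i always in range here)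
def pvSucc (wt : List Int) (i : Int) (ptime : Int) : List Int :=
  PySem.List.pySetD wt i (PySem.List.pyGetD wt i 0 + ptime)

-- the inner 'for i in range(num_cpus)' loop of A, collecting the enqueued triples
def pvChildrenA (num_cpus : Int) (pidx : Nat) (cur ptime : Int) (wt : List Int) :
    List (Nat × Int × List Int) :=
  (PySem.List.pyRange 0 num_cpus 1).foldl
    (fun acc i =>
      if PySem.List.pyGetD wt i 0 + ptime > 10 then acc
      else acc ++ [(pidx + 1, cur, pvSucc wt i ptime)]) []

-- termination potential for A's while-loop: Σ over the queue of (C+1)^(n - pidx)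
def pvMeasure (n Cn : Nat) (q : List (Nat × Int × List Int)) : Nat :=
  (q.map (fun s => (Cn + 1) ^ (n - s.1))).sum

lemma pvFoldl_skip_append {α β : Type} (p : α → Prop) [DecidablePred p] (f : α → β)
    (l : List α) (acc : List β) :
    l.foldl (fun acc i => if p i then acc else acc ++ [f i]) acc
      = acc ++ (l.filter (fun i => decide ¬ p i)).map f := by
  have h : (fun (acc : List β) (i : α) => if p i then acc else acc ++ [f i])
      = (fun acc i => if (fun j => decide ¬ p j) i = true then acc ++ [f i] else acc) := by
    funext acc i; by_cases h : p i <;> simp [h]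
  rw [h, PySem.List.foldl_append_if]

lemma pvChildrenA_eq (num_cpus : Int) (pidx : Nat) (cur ptime : Int) (wt : List Int) :
    pvChildrenA num_cpus pidx cur ptime wt
      = (((PySem.List.pyRange 0 num_cpus 1).filter
            (fun i => decide ¬ (PySem.List.pyGetD wt i 0 + ptime > 10))).map
          (fun i => (pidx + 1, cur, pvSucc wt i ptime))) := by
  unfold pvChildrenA
  rw [pvFoldl_skip_append (p := fun i => PySem.List.pyGetD wt i 0 + ptime > 10)]
  simp

lemma pvMeasure_children_lt (n Cn : Nat) (pidx : Nat) (cur ptime : Int) (wt : List Int)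
    (C : Int) (hC : Cn = C.toNat) (hp : pidx < n) :
    pvMeasure n Cn (pvChildrenA C pidx cur ptime wt) < (Cn + 1) ^ (n - pidx) := by
  rw [pvChildrenA_eq]
  have hX : 0 < (Cn + 1) ^ (n - (pidx + 1)) := pow_pos (by omega) _
  have hsum : pvMeasure n Cn
      (((PySem.List.pyRange 0 C 1).filter
          (fun i => decide ¬ (PySem.List.pyGetD wt i 0 + ptime > 10))).map
        (fun i => (pidx + 1, cur, pvSucc wt i ptime)))
      = ((PySem.List.pyRange 0 C 1).filter
          (fun i => decide ¬ (PySem.List.pyGetD wt i 0 + ptime > 10))).length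
        * (Cn + 1) ^ (n - (pidx + 1)) := by
    simp [pvMeasure, List.map_map, Function.comp_def, List.map_const', List.sum_replicate,
      smul_eq_mul]
  have hlen : ((PySem.List.pyRange 0 C 1).filter
      (fun i => decide ¬ (PySem.List.pyGetD wt i 0 + ptime > 10))).length ≤ Cn := by
    calc ((PySem.List.pyRange 0 C 1).filter
          (fun i => decide ¬ (PySem.List.pyGetD wt i 0 + ptime > 10))).length
        ≤ (PySem.List.pyRange 0 C 1).length := List.length_filter_le _ _
      _ = C.toNat := by simp [pysem]
      _ = Cn := hC.symm
  have hpow : (Cn + 1) ^ (n - pidx) = (Cn + 1) * (Cn + 1) ^ (n - (pidx + 1)) := by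
    have hnp : n - pidx = (n - (pidx + 1)) + 1 := by omega
    rw [hnp, pow_succ]
    ring
  rw [hsum, hpow]
  calc ((PySem.List.pyRange 0 C 1).filter
        (fun i => decide ¬ (PySem.List.pyGetD wt i 0 + ptime > 10))).length
        * (Cn + 1) ^ (n - (pidx + 1))
      ≤ Cn * (Cn + 1) ^ (n - (pidx + 1)) := Nat.mul_le_mul_right _ hlen
    _ < (Cn + 1) * (Cn + 1) ^ (n - (pidx + 1)) := (Nat.mul_lt_mul_right hX).mpr (Nat.lt_succ_self Cn)

def pvGoA (packets : List (Int × Int)) (num_cpus : Int) :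
    List (Nat × Int × List Int) → PySem.Set (Nat × List Int) → Bool
  | [], _ => false
  | (pidx, prev, wt0) :: rest, vis =>
    if pidx = packets.length then true
    else
      match hp : PySem.List.pyGet? packets (pidx : Int) with
      | none => false   -- unreachable: pidx < len(packets) on every call; Python raises IndexError
      | some (cur, ptime) =>
        let wt := pvNorm (cur - prev) wt0
        if PySem.Set.contains vis (pidx, wt) then pvGoA packets num_cpus rest vis
        else pvGoA packets num_cpus (rest ++ pvChildrenA num_cpus pidx cur ptime wt)
               (PySem.Set.add vis (pidx, wt))
termination_by q _ => pvMeasure packets.length num_cpus.toNat q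
decreasing_by
  · have h1 : 0 < (num_cpus.toNat + 1) ^ (packets.length - pidx) := pow_pos (by omega) _
    simp only [pvMeasure, List.map_cons, List.sum_cons]; omega
  · have h2 : pidx < packets.length := by
      have := hp
      rw [PySem.List.pyGet?_natCast] at this
      exact (List.getElem?_eq_some_iff.mp this).1
    have h3 := pvMeasure_children_lt packets.length num_cpus.toNat pidx cur ptime
      (pvNorm (cur - prev) wt0) num_cpus rfl h2
    simp only [pvMeasure, List.map_cons, List.sum_cons, List.map_append, List.sum_append] at *
    omega

def simulation_bfs (packets : List (Int × Int)) (num_cpus : Int) : Bool :=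
  pvGoA packets num_cpus [(0, 0, List.replicate num_cpus.toNat 0)] PySem.Set.empty

-- ===== PORT B =====
-- one level of B: successors (deduplicated) of every wait-tuple in the frontier
def pvStepB (num_cpus delta ptime : Int) (frontier : PySem.Set (List Int)) :
    PySem.Set (List Int) :=
  frontier.foldl
    (fun nxt wt =>
      let norm := pvNorm delta wt
      (PySem.List.pyRange 0 num_cpus 1).foldl
        (fun nxt i =>
          if PySem.List.pyGetD norm i 0 + ptime > 10 then nxt
          else PySem.Set.add nxt (pvSucc norm i ptime)) nxt)
    PySem.Set.empty

def pvLoopB (num_cpus : Int) : List (Int × Int) → Int → PySem.Set (List Int) → Bool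
  | [], _, _ => true
  | (cur, ptime) :: rest, prev, frontier =>
    let nxt := pvStepB num_cpus (cur - prev) ptime frontier
    if nxt.isEmpty then false
    else pvLoopB num_cpus rest cur nxt

def simulation_bfs_alt (packets : List (Int × Int)) (num_cpus : Int) : Bool :=
  pvLoopB num_cpus packets 0 (PySem.Set.ofList [List.replicate num_cpus.toNat 0])

-- ===== PRECONDITION & SPEC =====
def Spec_simulation_bfs (packets : List (Int × Int)) (num_cpus : Int) (out : Bool) : Prop := out = simulation_bfs_alt packets num_cpus
instance (packets : List (Int × Int)) (num_cpus : Int) (out : Bool) : Decidable (Spec_simulation_bfs packets num_cpus out) := by unfold Spec_simulation_bfs; infer_instance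

-- ===== CLAIM (what is proved, stated in full; the proofs are below) =====
def Claim_equal_simulation_bfs : Prop := ∀ (packets : List (Int × Int)) (num_cpus : Int), Dom_simulation_bfs packets num_cpus → Spec_simulation_bfs packets num_cpus (simulation_bfs packets num_cpus)


-- ===== LEMMAS AND PROOFS =====

lemma pvContains_iff {a : Type} [BEq a] [LawfulBEq a] (s : PySem.Set a) (x : a) :
    PySem.Set.contains s x = true ↔ x ∈ s := by
  simp [PySem.Set.contains]

lemma pvGoA_nil (packets : List (Int × Int)) (C : Int) (vis : PySem.Set (Nat × List Int)) :
    pvGoA packets C [] vis = false := by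
  simp only [pvGoA]

lemma pvGoA_done (packets : List (Int × Int)) (C : Int) (pidx : Nat) (prev : Int)
    (wt0 : List Int) (rest : List (Nat × Int × List Int)) (vis : PySem.Set (Nat × List Int))
    (h : pidx = packets.length) :
    pvGoA packets C ((pidx, prev, wt0) :: rest) vis = true := by
  simp only [pvGoA]
  simp [h]

lemma pvGoA_skip (packets : List (Int × Int)) (C : Int) (pidx : Nat) (prev : Int)
    (wt0 : List Int) (rest : List (Nat × Int × List Int)) (vis : PySem.Set (Nat × List Int))
    (c t : Int)
    (h : ¬ pidx = packets.length)
    (hget : PySem.List.pyGet? packets (pidx : Int) = some (c, t))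
    (hc : PySem.Set.contains vis (pidx, pvNorm (c - prev) wt0) = true) :
    pvGoA packets C ((pidx, prev, wt0) :: rest) vis = pvGoA packets C rest vis := by
  simp only [pvGoA]
  rw [if_neg h]
  split
  · next heq => rw [hget] at heq; cases heq
  · next cur ptime heq =>
    rw [hget] at heq
    simp only [Option.some.injEq, Prod.mk.injEq] at heq
    obtain ⟨rfl, rfl⟩ := heq
    simp only [hc]
    simp

lemma pvGoA_expand (packets : List (Int × Int)) (C : Int) (pidx : Nat) (prev : Int)
    (wt0 : List Int) (rest : List (Nat × Int × List Int)) (vis : PySem.Set (Nat × List Int))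
    (c t : Int)
    (h : ¬ pidx = packets.length)
    (hget : PySem.List.pyGet? packets (pidx : Int) = some (c, t))
    (hc : PySem.Set.contains vis (pidx, pvNorm (c - prev) wt0) = false) :
    pvGoA packets C ((pidx, prev, wt0) :: rest) vis
      = pvGoA packets C (rest ++ pvChildrenA C pidx c t (pvNorm (c - prev) wt0))
          (PySem.Set.add vis (pidx, pvNorm (c - prev) wt0)) := by
  simp only [pvGoA]
  rw [if_neg h]
  split
  · next heq => rw [hget] at heq; cases heq
  · next cur ptime heq =>
    rw [hget] at heq
    simp only [Option.some.injEq, Prod.mk.injEq] at heq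
    obtain ⟨rfl, rfl⟩ := heq
    simp only [hc]
    simp

lemma pvMem_childrenA (num_cpus : Int) (pidx : Nat) (cur ptime : Int) (wt : List Int)
    (x : Nat × Int × List Int) :
    x ∈ pvChildrenA num_cpus pidx cur ptime wt
      ↔ ∃ i ∈ PySem.List.pyRange 0 num_cpus 1,
          ¬ (PySem.List.pyGetD wt i 0 + ptime > 10) ∧ x = (pidx + 1, cur, pvSucc wt i ptime) := by
  rw [pvChildrenA_eq]
  simp only [List.mem_map, List.mem_filter, decide_not]
  constructor
  · rintro ⟨i, ⟨hi, hcond⟩, rfl⟩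
    exact ⟨i, hi, by simpa using hcond, rfl⟩
  · rintro ⟨i, hi, hcond, rfl⟩
    exact ⟨i, ⟨hi, by simpa using hcond⟩, rfl⟩

lemma pvMem_foldl_skip_add (pt : Int) (d : List Int) (x : List Int) :
    ∀ (l : List Int) (s : PySem.Set (List Int)),
    x ∈ l.foldl (fun nxt i =>
          if PySem.List.pyGetD d i 0 + pt > 10 then nxt
          else PySem.Set.add nxt (pvSucc d i pt)) s
      ↔ x ∈ s ∨ ∃ i ∈ l, ¬ (PySem.List.pyGetD d i 0 + pt > 10) ∧ x = pvSucc d i pt := by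
  intro l
  induction l with
  | nil => simp
  | cons a l ih =>
    intro s
    simp only [List.foldl_cons]
    rw [ih]
    by_cases h : PySem.List.pyGetD d a 0 + pt > 10
    · simp only [if_pos h]
      constructor
      · rintro (hs | ⟨i, hi, hci, hx⟩)
        · exact Or.inl hs
        · exact Or.inr ⟨i, List.mem_cons_of_mem _ hi, hci, hx⟩
      · rintro (hs | ⟨i, hi, hci, hx⟩)
        · exact Or.inl hs
        · rcases List.mem_cons.mp hi with rfl | hi'
          · exact absurd h hci
          · exact Or.inr ⟨i, hi', hci, hx⟩
    · simp only [if_neg h]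
      rw [show ∀ (P : Prop), (x ∈ PySem.Set.add s (pvSucc d a pt) ∨ P)
            ↔ ((x ∈ s ∨ x = pvSucc d a pt) ∨ P) from
          fun P => by rw [PySem.Set.mem_add]]
      constructor
      · rintro ((hs | hx) | ⟨i, hi, hci, hx⟩)
        · exact Or.inl hs
        · exact Or.inr ⟨a, List.mem_cons_self, h, hx⟩
        · exact Or.inr ⟨i, List.mem_cons_of_mem _ hi, hci, hx⟩
      · rintro (hs | ⟨i, hi, hci, hx⟩)
        · exact Or.inl (Or.inl hs)
        · rcases List.mem_cons.mp hi with rfl | hi'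
          · exact Or.inl (Or.inr hx)
          · exact Or.inr ⟨i, hi', hci, hx⟩

lemma pvStepB_aux (C delta pt : Int) (x : List Int) :
    ∀ (ws : List (List Int)) (s : PySem.Set (List Int)),
    x ∈ ws.foldl (fun nxt wt =>
          let norm := pvNorm delta wt
          (PySem.List.pyRange 0 C 1).foldl
            (fun nxt i =>
              if PySem.List.pyGetD norm i 0 + pt > 10 then nxt
              else PySem.Set.add nxt (pvSucc norm i pt)) nxt) s
      ↔ x ∈ s ∨ ∃ w ∈ ws, ∃ i ∈ PySem.List.pyRange 0 C 1,
          ¬ (PySem.List.pyGetD (pvNorm delta w) i 0 + pt > 10) ∧ x = pvSucc (pvNorm delta w) i pt := by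
  intro ws
  induction ws with
  | nil => simp
  | cons w ws ih =>
    intro s
    simp only [List.foldl_cons]
    rw [ih]
    rw [pvMem_foldl_skip_add]
    constructor
    · rintro ((hs | ⟨i, hi, hci, hx⟩) | ⟨w', hw', i, hi, hci, hx⟩)
      · exact Or.inl hs
      · exact Or.inr ⟨w, List.mem_cons_self, i, hi, hci, hx⟩
      · exact Or.inr ⟨w', List.mem_cons_of_mem _ hw', i, hi, hci, hx⟩
    · rintro (hs | ⟨w', hw', i, hi, hci, hx⟩)
      · exact Or.inl (Or.inl hs)
      · rcases List.mem_cons.mp hw' with rfl | hw''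
        · exact Or.inl (Or.inr ⟨i, hi, hci, hx⟩)
        · exact Or.inr ⟨w', hw'', i, hi, hci, hx⟩

lemma pvMem_stepB (C delta pt : Int) (F : PySem.Set (List Int)) (x : List Int) :
    x ∈ pvStepB C delta pt F
      ↔ ∃ w ∈ F, ∃ i ∈ PySem.List.pyRange 0 C 1,
          ¬ (PySem.List.pyGetD (pvNorm delta w) i 0 + pt > 10) ∧ x = pvSucc (pvNorm delta w) i pt := by
  unfold pvStepB
  rw [pvStepB_aux]
  simp [PySem.Set.empty]

lemma pvInner (packets : List (Int × Int)) (C : Int) (k : Nat) (p c t : Int)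
    (ps' : List (Int × Int))
    (hk : ¬ (k = packets.length))
    (hget : PySem.List.pyGet? packets (k : Int) = some (c, t))
    (L : List (List Int)) (F : PySem.Set (List Int))
    (hLF : ∀ w, w ∈ L ↔ w ∈ F)
    (HK : ∀ (L' : List (List Int)) (F' : PySem.Set (List Int))
            (vis' : PySem.Set (Nat × List Int)), L' ≠ [] → (∀ w, w ∈ L' ↔ w ∈ F') →
            (∀ st ∈ vis', st.1 < k + 1) →
            pvGoA packets C (L'.map (fun w => (k + 1, c, w))) vis' = pvLoopB C ps' c F') :
    ∀ (Lrem : List (List Int)) (AccT : List (Nat × Int × List Int))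
      (vis : PySem.Set (Nat × List Int)),
    (∀ w ∈ Lrem, w ∈ L) →
    (∀ st ∈ vis, st.1 < k ∨ (st.1 = k ∧ ∃ w ∈ L, st.2 = pvNorm (c - p) w)) →
    (∀ y, y ∈ AccT ↔ ∃ d, (k, d) ∈ vis ∧ ∃ i ∈ PySem.List.pyRange 0 C 1,
        ¬ (PySem.List.pyGetD d i 0 + t > 10) ∧ y = (k + 1, c, pvSucc d i t)) →
    (∀ w ∈ L, (k, pvNorm (c - p) w) ∈ vis ∨ w ∈ Lrem) →
    pvGoA packets C (Lrem.map (fun w => (k, p, w)) ++ AccT) vis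
      = (if (pvStepB C (c - p) t F).isEmpty then false
         else pvLoopB C ps' c (pvStepB C (c - p) t F)) := by
  intro Lrem
  induction Lrem with
  | nil =>
    intro AccT vis h1 h2 h3 h4
    simp only [List.map_nil, List.nil_append]
    rcases List.eq_nil_or_concat' AccT with rfl | hAcc
    · have hempty : pvStepB C (c - p) t F = [] := by
        rw [List.eq_nil_iff_forall_not_mem]
        intro x hx
        rcases (pvMem_stepB C (c - p) t F x).mp hx with ⟨w, hwF, i, hi, hcond, hxeq⟩
        have hwL : w ∈ L := (hLF w).mpr hwF
        rcases h4 w hwL with hv | hfalse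
        · have hmem : (k + 1, c, pvSucc (pvNorm (c - p) w) i t) ∈ ([] : List (Nat × Int × List Int)) :=
            (h3 _).mpr ⟨pvNorm (c - p) w, hv, i, hi, hcond, rfl⟩
          simp at hmem
        · simp at hfalse
      rw [pvGoA_nil, hempty]
      simp
    · have hAccNe : AccT ≠ [] := by rcases hAcc with ⟨l, a, rfl⟩; simp
      have hform : ∀ y ∈ AccT, y = (k + 1, c, y.2.2) := by
        intro y hy
        rcases (h3 y).mp hy with ⟨d, _, i, _, _, hyeq⟩
        rw [hyeq]
      have hAccEq : AccT = (AccT.map (fun y => y.2.2)).map (fun w => (k + 1, c, w)) := by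
        rw [List.map_map]
        conv_lhs => rw [show AccT = AccT.map id from (List.map_id AccT).symm]
        exact List.map_congr_left (fun y hy => hform y hy)
      have hnonempty : AccT.map (fun y => y.2.2) ≠ [] := by
        simpa using hAccNe
      have hmem : ∀ z, z ∈ AccT.map (fun y => y.2.2) ↔ z ∈ pvStepB C (c - p) t F := by
        intro z
        constructor
        · intro hz
          rcases List.mem_map.mp hz with ⟨y, hy, rfl⟩
          rcases (h3 y).mp hy with ⟨d, hdv, i, hi, hcond, hyeq⟩
          rcases h2 _ hdv with hlt | ⟨_, w0, hw0L, hdw⟩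
          · simp at hlt
          · have hdw' : d = pvNorm (c - p) w0 := hdw
            refine (pvMem_stepB _ _ _ _ _).mpr ⟨w0, (hLF w0).mp hw0L, i, hi, ?_, ?_⟩
            · rw [← hdw']; exact hcond
            · rw [hyeq, hdw']
        · intro hz
          rcases (pvMem_stepB _ _ _ _ _).mp hz with ⟨w0, hw0F, i, hi, hcond, rfl⟩
          have hw0L := (hLF w0).mpr hw0F
          rcases h4 w0 hw0L with hv | hmem'
          · have hy : (k + 1, c, pvSucc (pvNorm (c - p) w0) i t) ∈ AccT :=
              (h3 _).mpr ⟨pvNorm (c - p) w0, hv, i, hi, hcond, rfl⟩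
            exact List.mem_map.mpr ⟨_, hy, rfl⟩
          · simp at hmem'
      have hvis' : ∀ st ∈ vis, st.1 < k + 1 := by
        intro st hst
        rcases h2 st hst with h | ⟨h, _⟩ <;> omega
      have hres := HK (AccT.map (fun y => y.2.2)) (pvStepB C (c - p) t F) vis
        hnonempty hmem hvis'
      rw [← hAccEq] at hres
      rw [hres]
      have hne : pvStepB C (c - p) t F ≠ [] := by
        rcases List.exists_mem_of_ne_nil AccT hAccNe with ⟨y, hy⟩
        exact List.ne_nil_of_mem ((hmem y.2.2).mp (List.mem_map.mpr ⟨y, hy, rfl⟩))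
      rw [if_neg (by simpa [List.isEmpty_iff] using hne)]
  | cons w Lrem' ih =>
    intro AccT vis h1 h2 h3 h4
    simp only [List.map_cons, List.cons_append]
    by_cases hc : PySem.Set.contains vis (k, pvNorm (c - p) w) = true
    · rw [pvGoA_skip packets C k p w (Lrem'.map (fun w => (k, p, w)) ++ AccT) vis c t hk hget hc]
      apply ih AccT vis (fun w' hw' => h1 w' (List.mem_cons_of_mem _ hw')) h2 h3
      intro w' hw'
      rcases h4 w' hw' with hv | hmem
      · exact Or.inl hv
      · rcases List.mem_cons.mp hmem with rfl | hmem'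
        · exact Or.inl ((pvContains_iff vis _).mp hc)
        · exact Or.inr hmem'
    · have hc' : PySem.Set.contains vis (k, pvNorm (c - p) w) = false := by
        simpa using hc
      rw [pvGoA_expand packets C k p w (Lrem'.map (fun w => (k, p, w)) ++ AccT) vis c t hk hget hc']
      rw [List.append_assoc]
      have hwL : w ∈ L := h1 w List.mem_cons_self
      apply ih (AccT ++ pvChildrenA C k c t (pvNorm (c - p) w))
        (PySem.Set.add vis (k, pvNorm (c - p) w))
        (fun w' hw' => h1 w' (List.mem_cons_of_mem _ hw'))
      · intro st hst
        rcases (PySem.Set.mem_add vis _ st).mp hst with hst' | rfl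
        · exact h2 st hst'
        · exact Or.inr ⟨rfl, w, hwL, rfl⟩
      · intro y
        constructor
        · intro hy
          rcases List.mem_append.mp hy with hy' | hy'
          · rcases (h3 y).mp hy' with ⟨d, hdv, i, hi, hcond, hyeq⟩
            exact ⟨d, (PySem.Set.mem_add vis _ _).mpr (Or.inl hdv), i, hi, hcond, hyeq⟩
          · rcases (pvMem_childrenA C k c t (pvNorm (c - p) w) y).mp hy' with ⟨i, hi, hcond, hyeq⟩
            exact ⟨pvNorm (c - p) w, (PySem.Set.mem_add vis _ _).mpr (Or.inr rfl), i, hi, hcond, hyeq⟩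
        · rintro ⟨d, hdv, i, hi, hcond, hyeq⟩
          rcases (PySem.Set.mem_add vis _ _).mp hdv with hdv' | hdeq
          · exact List.mem_append.mpr (Or.inl ((h3 y).mpr ⟨d, hdv', i, hi, hcond, hyeq⟩))
          · have hd : d = pvNorm (c - p) w := by
              simpa using congrArg Prod.snd hdeq
            exact List.mem_append.mpr (Or.inr
              ((pvMem_childrenA C k c t (pvNorm (c - p) w) y).mpr
                ⟨i, hi, by rw [← hd]; exact hcond, by rw [← hd]; exact hyeq⟩))
      · intro w' hw'
        rcases h4 w' hw' with hv | hmem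
        · exact Or.inl ((PySem.Set.mem_add vis _ _).mpr (Or.inl hv))
        · rcases List.mem_cons.mp hmem with rfl | hmem'
          · exact Or.inl ((PySem.Set.mem_add vis _ _).mpr (Or.inr rfl))
          · exact Or.inr hmem'

lemma pvMain (packets : List (Int × Int)) (C : Int) :
    ∀ (ps : List (Int × Int)) (k : Nat) (p : Int) (L : List (List Int))
      (F : PySem.Set (List Int)) (vis : PySem.Set (Nat × List Int)),
    ps = packets.drop k → k ≤ packets.length →
    L ≠ [] → (∀ w, w ∈ L ↔ w ∈ F) → (∀ st ∈ vis, st.1 < k) →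
    pvGoA packets C (L.map (fun w => (k, p, w))) vis = pvLoopB C ps p F := by
  intro ps
  induction ps with
  | nil =>
    intro k p L F vis hdrop hkle hL hLF hvis
    have hk : k = packets.length := by
      have hle := List.drop_eq_nil_iff.mp hdrop.symm
      omega
    obtain ⟨w, L', rfl⟩ := List.exists_cons_of_ne_nil hL
    simp only [List.map_cons]
    rw [pvGoA_done packets C k p w _ vis hk]
    simp [pvLoopB]
  | cons ct ps' ih =>
    obtain ⟨c, t⟩ := ct
    intro k p L F vis hdrop hkle hL hLF hvis
    have hklt : k < packets.length := by
      by_contra hcon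
      have hnil : packets.drop k = [] := List.drop_eq_nil_iff.mpr (by omega)
      rw [hnil] at hdrop
      cases hdrop
    have hdec := List.drop_eq_getElem_cons hklt
    rw [hdec] at hdrop
    injection hdrop with hhd htl
    have hget : PySem.List.pyGet? packets (k : Int) = some (c, t) := by
      rw [PySem.List.pyGet?_natCast, List.getElem?_eq_getElem hklt, ← hhd]
    have HK : ∀ (L' : List (List Int)) (F' : PySem.Set (List Int))
        (vis' : PySem.Set (Nat × List Int)), L' ≠ [] → (∀ w, w ∈ L' ↔ w ∈ F') →
        (∀ st ∈ vis', st.1 < k + 1) →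
        pvGoA packets C (L'.map (fun w => (k + 1, c, w))) vis' = pvLoopB C ps' c F' := by
      intro L' F' vis' a b d
      exact ih (k + 1) c L' F' vis' htl (by omega) a b d
    have hres := pvInner packets C k p c t ps' (by omega) hget L F hLF HK L [] vis
      (fun w hw => hw)
      (fun st hst => Or.inl (hvis st hst))
      (by
        intro y
        constructor
        · intro hy; simp at hy
        · rintro ⟨d, hdv, -⟩
          exact absurd (hvis _ hdv) (lt_irrefl k))
      (fun w hw => Or.inr hw)
    simp only [List.append_nil] at hres
    rw [hres]
    simp [pvLoopB]

-- ===== VERDICT (by name: the statement is the Claim_ definition above) =====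
theorem simulation_bfs_spec : Claim_equal_simulation_bfs := by
  intro packets num_cpus _
  unfold Spec_simulation_bfs simulation_bfs simulation_bfs_alt
  have h := pvMain packets num_cpus packets 0 0 [List.replicate num_cpus.toNat 0]
    (PySem.Set.ofList [List.replicate num_cpus.toNat 0]) PySem.Set.empty rfl (by omega)
    (by simp) (by intro w; rw [PySem.Set.mem_ofList]) (by intro st hst; simp [PySem.Set.empty] at hst)
  simpa using h
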